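-- pv_equiv track=rewrite | github.com/junyjiang/Algorithms | others/TurnOnLight.py | turnon
-- ===== SOURCE A (Python) =====
-- def turnon(t,p):
--     a = list(range(1, t + 1))#将灯的位置放置到list中作为后续确认开关的索引
--     b=[]
--     for i in a:#对应每一盏灯
--         for j in range(1, p+1):#每一个人都会对自己的倍数所对应的灯
--             if j % i == 0:
--                 a[j-1] = a[j-1] * -1#操作一次对应更改一次开关状态
--     for n in range(0, (len(a))):
--         if a[n] < 0:
--             b.append(-a[n])
--     return b
-- ===== SOURCE B (Python) =====
-- def turnon(t, p):
--     m = min(t, p)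
--     res = []
--     k = 1
--     while k * k <= m:
--         res.append(k * k)
--         k += 1
--     return res
-- ===== Notes on version B (the rewrite author's own statement) =====
-- stated objective: faster
-- what changed: B replaces A's O(t*p) lamp-toggling simulation (nested loops flipping signs in a list) by directly emitting the perfect squares k*k for k*k <= min(t,p): a lamp ends up on iff its number has an odd number of divisors iff it is a perfect square.
import Mathlib
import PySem

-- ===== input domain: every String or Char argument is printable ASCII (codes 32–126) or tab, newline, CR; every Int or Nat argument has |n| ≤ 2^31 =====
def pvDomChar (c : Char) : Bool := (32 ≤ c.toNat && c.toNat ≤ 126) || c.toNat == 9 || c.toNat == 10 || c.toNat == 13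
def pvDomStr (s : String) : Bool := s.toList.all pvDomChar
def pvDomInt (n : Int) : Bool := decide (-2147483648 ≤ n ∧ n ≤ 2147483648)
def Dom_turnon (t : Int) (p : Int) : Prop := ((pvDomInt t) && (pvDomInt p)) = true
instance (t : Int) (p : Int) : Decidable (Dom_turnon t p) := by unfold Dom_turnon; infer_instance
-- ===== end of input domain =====

-- B replaces A's nested-loop lamp-toggling simulation by directly emitting the perfect squares ≤ min(t, p) (asymptotically faster).

-- ===== PORT A =====
-- inner loop: 'for j in range(1, p+1): if j % i == 0: a[j-1] = a[j-1] * -1'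
def turnonInner (i : Int) (p : Int) (a : List Int) : List Int :=
  (PySem.List.pyRange 1 (p + 1) 1).foldl
    (fun acc j =>
      if PySem.Int.mod j i = 0 then
        PySem.List.pySetD acc (j - 1) (PySem.List.pyGetD acc (j - 1) 0 * -1)
      else acc) a

-- outer loop: 'for i in a' — Python iterates by index over the live (mutated) list;
-- item assignment keeps the length invariant, so it runs for the initial length, reading a[idx] each round
def turnonOuter (p : Int) : Nat → Nat → List Int → List Int
  | _, 0, a => a
  | idx, n + 1, a => turnonOuter p (idx + 1) n (turnonInner (PySem.List.pyGetD a (idx : Int) 0) p a)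

def turnon (t : Int) (p : Int) : List Int :=
  let a := PySem.List.pyRange 1 (t + 1) 1
  let a2 := turnonOuter p 0 a.length a
  (PySem.List.pyRange 0 (PySem.List.len a2) 1).foldl
    (fun b n =>
      if PySem.List.pyGetD a2 n 0 < 0 then b ++ [-(PySem.List.pyGetD a2 n 0)] else b) []

-- ===== PORT B =====
-- 'while k*k <= m: res.append(k*k); k += 1' — fuel m.toNat+1 bounds the iteration count
def turnonAltGo (m : Int) : Int → List Int → Nat → List Int
  | _, res, 0 => res
  | k, res, fuel + 1 => if k * k ≤ m then turnonAltGo m (k + 1) (res ++ [k * k]) fuel else res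

def turnon_alt (t : Int) (p : Int) : List Int :=
  turnonAltGo (min t p) 1 [] ((min t p).toNat + 1)

-- ===== PRECONDITION & SPEC =====
-- Pre_ excludes exactly the inputs on which A raises IndexError: p > t with t ≥ 1
-- (person j ∈ (t, p] toggles lamp j, which is outside the list of t lamps).
def Pre_turnon (t : Int) (p : Int) : Prop := p ≤ t ∨ t ≤ 0
instance (t : Int) (p : Int) : Decidable (Pre_turnon t p) := by unfold Pre_turnon; infer_instance
def pvWitness_turnon : Int × Int := (10, 10)

def Spec_turnon (t : Int) (p : Int) (out : List Int) : Prop := out = turnon_alt t p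
instance (t : Int) (p : Int) (out : List Int) : Decidable (Spec_turnon t p out) := by unfold Spec_turnon; infer_instance

-- ===== CLAIM (what is proved, stated in full; the proofs are below) =====
def Claim_equal_turnon : Prop := ∀ (t : Int) (p : Int), Dom_turnon t p → Pre_turnon t p → Spec_turnon t p (turnon t p)

-- ===== LEMMAS AND PROOFS =====


-- p may be replaced by its toNat (negative p gives an empty range)
theorem inner_toNat (i p : Int) (a : List Int) : turnonInner i p a = turnonInner i (p.toNat : Int) a := by
  unfold turnonInner
  by_cases h : p ≤ 0
  · rw [PySem.List.pyRange_one_eq_nil (by omega), PySem.List.pyRange_one_eq_nil (by omega)]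
  · congr 2; omega

theorem length_inner_foldl (l : List Int) (i : Int) (a : List Int) :
    (l.foldl (fun acc j =>
      if PySem.Int.mod j i = 0 then
        PySem.List.pySetD acc (j - 1) (PySem.List.pyGetD acc (j - 1) 0 * -1)
      else acc) a).length = a.length := by
  induction l generalizing a with
  | nil => rfl
  | cons x xs ih =>
      simp only [List.foldl_cons]
      rw [ih]
      split
      · exact PySem.List.length_pySetD _ _ _
      · rfl

theorem length_inner (i p : Int) (a : List Int) : (turnonInner i p a).length = a.length :=
  length_inner_foldl _ _ _

theorem getD_set0 (l : List Int) (i n : Nat) (v : Int) :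
    (l.set i v).getD n 0 = if n = i ∧ n < l.length then v else l.getD n 0 := by
  simp only [List.getD_eq_getElem?_getD, List.getElem?_set]
  split_ifs with h1 h2 h3 <;> simp_all <;> omega

theorem inner_getD (q : Nat) (i : Int) (a : List Int) (n : Nat) :
    (turnonInner i (q : Int) a).getD n 0 =
      if n < q ∧ PySem.Int.mod ((n : Int) + 1) i = 0 then -(a.getD n 0) else a.getD n 0 := by
  induction q generalizing n with
  | zero =>
      unfold turnonInner
      rw [PySem.List.pyRange_one_eq_nil (by omega)]
      simp
  | succ q ih =>
      unfold turnonInner at *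
      have hq : ((q + 1 : Nat) : Int) + 1 = ((q : Int) + 1) + 1 := by push_cast; ring
      rw [hq, PySem.List.pyRange_one_succ_right (by omega), List.foldl_append]
      simp only [List.foldl_cons, List.foldl_nil]
      have hlen : ∀ b : List Int, (List.foldl (fun acc j =>
          if PySem.Int.mod j i = 0 then
            PySem.List.pySetD acc (j - 1) (PySem.List.pyGetD acc (j - 1) 0 * -1)
          else acc) b (PySem.List.pyRange 1 ((q:Int)+1) 1)) = b → True := fun _ _ => trivial
      set r := List.foldl (fun acc j =>
          if PySem.Int.mod j i = 0 then
            PySem.List.pySetD acc (j - 1) (PySem.List.pyGetD acc (j - 1) 0 * -1)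
          else acc) a (PySem.List.pyRange 1 ((q:Int)+1) 1) with hr
      have hrlen : r.length = a.length := length_inner_foldl _ _ _
      have hsub : ((q : Int) + 1 - 1) = (q : Int) := by ring
      by_cases hmod : PySem.Int.mod ((q : Int) + 1) i = 0
      · rw [if_pos hmod, hsub]
        rw [PySem.List.pySetD_natCast, PySem.List.pyGetD_natCast, getD_set0]
        by_cases hn : n = q
        · subst hn
          by_cases hin : n < r.length
          · rw [if_pos ⟨rfl, hin⟩, ih]
            have : ¬ (n < n ∧ PySem.Int.mod ((n:Int)+1) i = 0) := by
              intro ⟨h, _⟩; omega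
            rw [if_neg this, if_pos ⟨by omega, hmod⟩]; ring
          · rw [if_neg (by tauto)]
            rw [ih]
            have h0 : a.getD n 0 = 0 := by
              rw [List.getD_eq_getElem?_getD, List.getElem?_eq_none (by omega)]; rfl
            rw [if_neg (by intro ⟨h, _⟩; omega), if_pos ⟨by omega, hmod⟩, h0]; ring
        · rw [if_neg (by tauto), ih]
          by_cases hlt : n < q
          · have : (n < q + 1) = (n < q) := by simp; omega
            by_cases hm2 : PySem.Int.mod ((n:Int)+1) i = 0
            · rw [if_pos ⟨hlt, hm2⟩, if_pos ⟨by omega, hm2⟩]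
            · rw [if_neg (by tauto), if_neg (by tauto)]
          · rw [if_neg (by intro ⟨h,_⟩; omega), if_neg (by intro ⟨h,_⟩; omega)]
      · rw [if_neg hmod, ih]
        by_cases hlt : n < q
        · by_cases hm2 : PySem.Int.mod ((n:Int)+1) i = 0
          · rw [if_pos ⟨hlt, hm2⟩, if_pos ⟨by omega, hm2⟩]
          · rw [if_neg (by tauto), if_neg (by tauto)]
        · by_cases hn : n = q
          · rw [if_neg (by intro ⟨h,_⟩; omega), if_neg (by intro ⟨_,hm⟩; rw [hn] at hm; exact hmod hm)]
          · rw [if_neg (by intro ⟨h,_⟩; omega), if_neg (by intro ⟨h,_⟩; omega)]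


def cnt (k n : Nat) : Nat := ((Finset.range k).filter (fun d => (d + 1) ∣ (n + 1))).card

def model (P k n : Nat) : Int :=
  if n < P ∧ Odd (cnt k n) then -((n : Int) + 1) else (n : Int) + 1

theorem cnt_succ (k n : Nat) : cnt (k + 1) n = if (k + 1) ∣ (n + 1) then cnt k n + 1 else cnt k n := by
  unfold cnt
  rw [Finset.range_add_one, Finset.filter_insert]
  split_ifs with h
  · rw [Finset.card_insert_of_notMem (by simp)]
  · rfl

theorem model_step (P k n : Nat) :
    model P (k + 1) n = if n < P ∧ (k + 1) ∣ (n + 1) then -(model P k n) else model P k n := by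
  unfold model
  rw [cnt_succ]
  by_cases hd : (k + 1) ∣ (n + 1) <;> by_cases hp : n < P <;>
    simp [hd, hp, Nat.odd_add_one] <;> by_cases ho : Odd (cnt k n) <;> simp [ho]

theorem mod_pm_dvd (i : Int) (idx n : Nat)
    (hi : i = ((idx : Int) + 1) ∨ i = -((idx : Int) + 1)) :
    (PySem.Int.mod ((n : Int) + 1) i = 0) ↔ (idx + 1) ∣ (n + 1) := by
  rw [PySem.Int.mod_eq_zero_iff_dvd]
  rcases hi with h | h <;> subst h
  · constructor
    · intro hdvd; exact_mod_cast hdvd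
    · intro hdvd; exact_mod_cast hdvd
  · rw [Int.neg_dvd]
    constructor
    · intro hdvd; exact_mod_cast hdvd
    · intro hdvd; exact_mod_cast hdvd

theorem outer_model (p : Int) (P : Nat) (hP : P = p.toNat) (T : Nat) :
    ∀ (rem idx : Nat) (a : List Int), a.length = T → idx + rem ≤ T →
    (∀ n, a.getD n 0 = if n < T then model P idx n else 0) →
    ((turnonOuter p idx rem a).length = T ∧
      ∀ n, (turnonOuter p idx rem a).getD n 0 = if n < T then model P (idx + rem) n else 0) := by
  intro rem
  induction rem with
  | zero => intro idx a hlen _ hmod; exact ⟨hlen, by simpa using hmod⟩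
  | succ rem ih =>
      intro idx a hlen hle hmod
      set i := PySem.List.pyGetD a (idx : Int) 0 with hi
      have hival : i = a.getD idx 0 := by rw [hi, PySem.List.pyGetD_natCast]
      have hiform : i = ((idx : Int) + 1) ∨ i = -((idx : Int) + 1) := by
        rw [hival, hmod idx, if_pos (by omega)]
        unfold model
        split_ifs
        · right; rfl
        · left; rfl
      have ha' : ∀ n, (turnonInner i p a).getD n 0 = if n < T then model P (idx + 1) n else 0 := by
        intro n
        rw [inner_toNat, ← hP, inner_getD]
        simp only [mod_pm_dvd i idx n hiform, hmod n]
        by_cases hT : n < T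
        · rw [if_pos hT, if_pos hT, model_step]
        · rw [if_neg hT, if_neg hT]
          split_ifs <;> ring
      have hlen' : (turnonInner i p a).length = T := by rw [length_inner, hlen]
      have hres := ih (idx + 1) (turnonInner i p a) hlen' (by omega) ha'
      have heq : turnonOuter p idx (rem + 1) a = turnonOuter p (idx + 1) rem (turnonInner i p a) := rfl
      refine ⟨by rw [heq]; exact hres.1, fun n => ?_⟩
      rw [heq, hres.2 n, show idx + 1 + rem = idx + (rem + 1) from by omega]

theorem card_below_eq_above (m : Nat) (hm : 0 < m) :
    (m.divisors.filter (fun d => d * d < m)).card = (m.divisors.filter (fun d => m < d * d)).card := by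
  apply Finset.card_bij' (i := fun d _ => m / d) (j := fun e _ => m / e)
  · intro d hd
    simp only [Finset.mem_filter, Nat.mem_divisors] at hd ⊢
    obtain ⟨⟨⟨c, hc⟩, hne⟩, hlt⟩ := hd
    have hd0 : 0 < d := by by_contra h; push_neg at h; interval_cases d; omega
    have hcdiv : m / d = c := by rw [hc, Nat.mul_div_cancel_left _ hd0]
    have hdc : d < c := by nlinarith
    rw [hcdiv]
    exact ⟨⟨⟨d, by rw [hc, Nat.mul_comm]⟩, hne⟩, by nlinarith⟩
  · intro e he
    simp only [Finset.mem_filter, Nat.mem_divisors] at he ⊢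
    obtain ⟨⟨⟨c, hc⟩, hne⟩, hlt⟩ := he
    have he0 : 0 < e := by by_contra h; push_neg at h; interval_cases e; omega
    have hcdiv : m / e = c := by rw [hc, Nat.mul_div_cancel_left _ he0]
    have hce : c < e := by nlinarith
    rw [hcdiv]
    exact ⟨⟨⟨e, by rw [hc, Nat.mul_comm]⟩, hne⟩, by nlinarith⟩
  · intro d hd
    simp only [Finset.mem_filter, Nat.mem_divisors] at hd
    obtain ⟨⟨⟨c, hc⟩, hne⟩, _⟩ := hd
    have hd0 : 0 < d := by by_contra h; push_neg at h; interval_cases d; omega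
    have hc0 : 0 < c := by nlinarith
    rw [hc, Nat.mul_div_cancel_left _ hd0, Nat.mul_comm, Nat.mul_div_cancel_left _ hc0]
  · intro e he
    simp only [Finset.mem_filter, Nat.mem_divisors] at he
    obtain ⟨⟨⟨c, hc⟩, hne⟩, _⟩ := he
    have he0 : 0 < e := by by_contra h; push_neg at h; interval_cases e; omega
    have hc0 : 0 < c := by nlinarith
    rw [hc, Nat.mul_div_cancel_left _ he0, Nat.mul_comm, Nat.mul_div_cancel_left _ hc0]

theorem card_mid (m : Nat) (hm : 0 < m) :
    (m.divisors.filter (fun d => d * d = m)).card = if IsSquare m then 1 else 0 := by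
  split_ifs with hsq
  · obtain ⟨r, hr⟩ := hsq
    have : m.divisors.filter (fun d => d * d = m) = {r} := by
      ext d
      simp only [Finset.mem_filter, Nat.mem_divisors, Finset.mem_singleton]
      constructor
      · rintro ⟨-, hd⟩
        have hdr : d * d = r * r := by omega
        exact Nat.mul_self_inj.mp hdr
      · intro h; subst h; exact ⟨⟨⟨d, hr⟩, by omega⟩, by omega⟩
    rw [this, Finset.card_singleton]
  · rw [Finset.card_eq_zero, Finset.filter_eq_empty_iff]
    intro d hd h
    exact hsq ⟨d, by omega⟩
theorem odd_card_divisors_iff (m : Nat) (hm : 0 < m) : Odd m.divisors.card ↔ IsSquare m := by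
  have h1 : m.divisors.card = (m.divisors.filter (fun d => d * d < m)).card
      + ((m.divisors.filter (fun d => ¬ (d * d < m))).card) :=
    (Finset.filter_card_add_filter_neg_card_eq_card _).symm
  have h2 : (m.divisors.filter (fun d => ¬ (d * d < m))).card
      = ((m.divisors.filter (fun d => ¬ (d * d < m))).filter (fun d => d * d = m)).card
      + ((m.divisors.filter (fun d => ¬ (d * d < m))).filter (fun d => ¬ (d * d = m))).card :=
    (Finset.filter_card_add_filter_neg_card_eq_card _).symm
  have e1 : (m.divisors.filter (fun d => ¬ (d * d < m))).filter (fun d => d * d = m)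
      = m.divisors.filter (fun d => d * d = m) := by
    rw [Finset.filter_filter]
    apply Finset.filter_congr
    intro d _
    constructor
    · intro ⟨_, h⟩; exact h
    · intro h; exact ⟨by omega, h⟩
  have e2 : (m.divisors.filter (fun d => ¬ (d * d < m))).filter (fun d => ¬ (d * d = m))
      = m.divisors.filter (fun d => m < d * d) := by
    rw [Finset.filter_filter]
    apply Finset.filter_congr
    intro d _
    constructor
    · intro ⟨h1, h2⟩; omega
    · intro h; omega
  rw [h1, h2, e1, e2, ← card_below_eq_above m hm, card_mid m hm, Nat.odd_iff]
  split_ifs with hsq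
  · simp only [hsq, iff_true]; omega
  · simp only [hsq, iff_false]; omega



theorem cnt_eq_divisors (T n : Nat) (h : n < T) : cnt T n = (n + 1).divisors.card := by
  have himg : (n + 1).divisors = ((Finset.range T).filter (fun d => (d + 1) ∣ (n + 1))).image (fun d => d + 1) := by
    ext e
    simp only [Nat.mem_divisors, Finset.mem_image, Finset.mem_filter, Finset.mem_range]
    constructor
    · intro ⟨hdvd, _⟩
      have h1 : 1 ≤ e := Nat.one_le_iff_ne_zero.mpr (by rintro rfl; exact absurd (Nat.eq_zero_of_zero_dvd hdvd) (by omega))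
      have h2 : e ≤ n + 1 := Nat.le_of_dvd (by omega) hdvd
      exact ⟨e - 1, ⟨by omega, by rwa [Nat.sub_add_cancel h1]⟩, by omega⟩
    · rintro ⟨d, ⟨_, hdvd⟩, rfl⟩
      exact ⟨hdvd, by omega⟩
  rw [himg, Finset.card_image_of_injective _ (fun a b hab => by omega)]
  rfl

theorem squares_range_nat (P : Nat) :
    (List.range P).filter (fun n => decide (IsSquare (n + 1))) =
      (List.range (Nat.sqrt P)).map (fun k => k * (k + 2)) := by
  induction P with
  | zero => simp
  | succ P ih =>
      rw [List.range_succ, List.filter_append, ih]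
      by_cases hsq : IsSquare (P + 1)
      · obtain ⟨r, hr⟩ := hsq
        obtain ⟨s, rfl⟩ : ∃ s, r = s + 1 := ⟨r - 1, by
          rcases r with _ | r
          · simp at hr
          · omega⟩
        have hP : P = s * s + 2 * s := by
          have hx : (s + 1) * (s + 1) = s * s + 2 * s + 1 := by ring
          omega
        have hsqrt1 : Nat.sqrt (P + 1) = s + 1 := by
          have hx : P + 1 = (s + 1) ^ 2 := by rw [hr]; ring
          rw [hx, Nat.sqrt_eq']
        have hsqrtP : Nat.sqrt P = s := by
          apply Nat.le_antisymm
          · have hP2 : P < (s + 1) ^ 2 := by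
              have hx : (s + 1) ^ 2 = (s + 1) * (s + 1) := by ring
              omega
            have hx := Nat.sqrt_lt'.mpr hP2
            omega
          · exact Nat.le_sqrt'.mpr (show s ^ 2 ≤ P from by
              have hx : s ^ 2 = s * s := by ring
              omega)
        rw [hsqrt1, List.range_succ, List.map_append, hsqrtP]
        congr 1
        simp only [List.filter_cons, List.filter_nil, decide_eq_true_eq]
        rw [if_pos ⟨s + 1, hr⟩]
        simp only [List.map_cons, List.map_nil]
        congr 1
        have hx : s * (s + 2) = s * s + 2 * s := by ring
        omega
      · have hstep : Nat.sqrt (P + 1) = Nat.sqrt P := by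
          have hle : Nat.sqrt (P + 1) ^ 2 ≤ P + 1 := Nat.sqrt_le' _
          rcases Nat.lt_or_ge (Nat.sqrt (P + 1) ^ 2) (P + 1) with hlt | hge
          · apply Nat.le_antisymm
            · exact Nat.le_sqrt'.mpr (Nat.lt_succ_iff.mp hlt)
            · exact Nat.sqrt_le_sqrt (by omega)
          · have hx : P + 1 = Nat.sqrt (P + 1) * Nat.sqrt (P + 1) := by
              rw [← pow_two]; omega
            exact absurd ⟨Nat.sqrt (P + 1), hx⟩ hsq
        rw [hstep]
        simp only [List.filter_cons, List.filter_nil, decide_eq_true_eq]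
        rw [if_neg hsq]
        simp



theorem altGo (m : Int) (s : Nat) (hs : s = Nat.sqrt m.toNat) :
    ∀ (fuel k : Nat) (acc : List Int), s ≤ k + fuel →
      turnonAltGo m ((k : Int) + 1) acc fuel =
        acc ++ ((List.range s).drop k).map (fun j : Nat => ((j : Int) + 1) * ((j : Int) + 1)) := by
  intro fuel
  induction fuel with
  | zero =>
      intro k acc hle
      rw [List.drop_of_length_le (by simpa using (by omega : s ≤ k))]
      simp [turnonAltGo]
  | succ fuel ih =>
      intro k acc hle
      show (if ((k : Int) + 1) * ((k : Int) + 1) ≤ m then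
          turnonAltGo m (((k : Int) + 1) + 1) (acc ++ [((k : Int) + 1) * ((k : Int) + 1)]) fuel
        else acc) = _
      have hcast : (((k + 1) * (k + 1) : Nat) : Int) = ((k : Int) + 1) * ((k : Int) + 1) := by
        push_cast; ring
      have hcond : (((k : Int) + 1) * ((k : Int) + 1) ≤ m) ↔ (k + 1) * (k + 1) ≤ m.toNat := by
        have key : ∀ c : Nat, 1 ≤ c → ((c : Int) ≤ m ↔ c ≤ m.toNat) := fun c hc => by omega
        rw [← hcast]
        exact key _ (Nat.one_le_iff_ne_zero.mpr (Nat.mul_ne_zero (by omega) (by omega)))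
      by_cases hks : k + 1 ≤ s
      · rw [if_pos (hcond.mpr (by rw [hs] at hks; exact Nat.le_sqrt.mp hks))]
        have hcast2 : ((k : Int) + 1) + 1 = (((k + 1 : Nat) : Int)) + 1 := by push_cast; ring
        rw [hcast2, ih (k + 1) _ (by omega)]
        conv_rhs => rw [List.drop_eq_getElem_cons (by simpa using (by omega : k < s))]
        simp [List.getElem_range]
      · rw [if_neg (fun hc => hks (Nat.le_sqrt.mpr (hcond.mp hc) |>.trans_eq hs.symm) )]
        rw [List.drop_of_length_le (by simpa using (by omega : s ≤ k))]
        simp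

theorem alt_eq (t p : Int) :
    turnon_alt t p = (List.range (Nat.sqrt (min t p).toNat)).map
      (fun j : Nat => ((j : Int) + 1) * ((j : Int) + 1)) := by
  unfold turnon_alt
  have h0 : (1 : Int) = ((0 : Nat) : Int) + 1 := by norm_num
  rw [h0, altGo (min t p) (Nat.sqrt (min t p).toNat) rfl ((min t p).toNat + 1) 0 []
    (by have := Nat.sqrt_le_self (min t p).toNat; omega)]
  simp

theorem model_zero (P n : Nat) : model P 0 n = (n : Int) + 1 := by
  simp [model, cnt]

theorem length_init (t : Int) : (PySem.List.pyRange 1 (t + 1) 1).length = t.toNat := by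
  rw [PySem.List.length_pyRange_one]
  omega

theorem init_model (t : Int) (P : Nat) :
    ∀ n : Nat, (PySem.List.pyRange 1 (t + 1) 1).getD n 0 =
      if n < t.toNat then model P 0 n else 0 := by
  intro n
  rw [PySem.List.pyRange_one]
  rw [List.getD_eq_getElem?_getD, List.getElem?_map]
  by_cases h : n < (t + 1 - 1).toNat
  · rw [List.getElem?_range h, if_pos (by omega), model_zero]
    simp; ring
  · rw [List.getElem?_eq_none (by simpa using (by omega : (t + 1 - 1).toNat ≤ n)), if_neg (by omega)]
    rfl

theorem turnon_unfold (t p : Int) :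
    turnon t p =
      (PySem.List.pyRange 0 (PySem.List.len
          (turnonOuter p 0 (PySem.List.pyRange 1 (t + 1) 1).length (PySem.List.pyRange 1 (t + 1) 1))) 1).foldl
        (fun b n =>
          if PySem.List.pyGetD (turnonOuter p 0 (PySem.List.pyRange 1 (t + 1) 1).length (PySem.List.pyRange 1 (t + 1) 1)) n 0 < 0 then
            b ++ [-(PySem.List.pyGetD (turnonOuter p 0 (PySem.List.pyRange 1 (t + 1) 1).length (PySem.List.pyRange 1 (t + 1) 1)) n 0)]
          else b) [] := rfl

theorem filter_range_restrict (P d : Nat) (q : Nat → Bool) :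
    (List.range (P + d)).filter (fun n => decide (n < P) && q n) = (List.range P).filter q := by
  induction d with
  | zero =>
      apply List.filter_congr
      intro n hn
      rw [List.mem_range] at hn
      have hnP : n < P := by omega
      simp [hnP]
  | succ d ih =>
      rw [show P + (d + 1) = (P + d) + 1 from rfl, List.range_succ, List.filter_append, ih]
      simp

theorem cast_square_map (s : Nat) :
    ((List.range s).map (fun k => k * (k + 2))).map (fun n : Nat => ((n : Int) + 1)) =
      (List.range s).map (fun k : Nat => ((k : Int) + 1) * ((k : Int) + 1)) := by
  rw [List.map_map]
  apply List.map_congr_left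
  intro k _
  simp only [Function.comp]
  push_cast
  ring

theorem main_eq (t p : Int) (hpre : p ≤ t ∨ t ≤ 0) : turnon t p = turnon_alt t p := by
  by_cases ht : t ≤ 0
  · -- no lamps: both sides are []
    rw [turnon_unfold, alt_eq]
    rw [PySem.List.pyRange_one_eq_nil (by omega : t + 1 ≤ 1)]
    have h2 : turnonOuter p 0 ([] : List Int).length [] = [] := rfl
    rw [h2]
    have hmin : (min t p).toNat = 0 := by
      have : min t p ≤ t := min_le_left _ _
      omega
    rw [hmin]
    simp [PySem.List.pyRange_one_eq_nil, PySem.List.len]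
  · have hpt : p ≤ t := by tauto
    have hPT : p.toNat ≤ t.toNat := by omega
    set T := t.toNat with hT
    set P := p.toNat with hP
    set a0 := PySem.List.pyRange 1 (t + 1) 1 with ha0
    have hlen0 : a0.length = T := length_init t
    have hinit : ∀ n : Nat, a0.getD n 0 = if n < T then model P 0 n else 0 := init_model t P
    obtain ⟨hlen2, hval2⟩ :=
      outer_model p P rfl T T 0 a0 hlen0 (by omega) hinit
    simp only [Nat.zero_add] at hval2
    rw [turnon_unfold, ← ha0, hlen0]
    set a2 := turnonOuter p 0 T a0 with ha2
    rw [PySem.List.len_eq, hlen2]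
    rw [PySem.List.foldl_append_ite (fun n => PySem.List.pyGetD a2 n 0 < 0)
      (fun n => -(PySem.List.pyGetD a2 n 0))]
    rw [PySem.List.pyRange_zero_nat, List.filter_map, List.map_map]
    simp only [Function.comp_def]
    have hcond : ∀ n : Nat, n < T →
        ((PySem.List.pyGetD a2 (n : Int) 0 < 0) ↔ (n < P ∧ IsSquare (n + 1))) := by
      intro n hn
      rw [PySem.List.pyGetD_natCast, hval2 n, if_pos hn]
      unfold model
      have hodd : Odd (cnt T n) ↔ IsSquare (n + 1) := by
        rw [cnt_eq_divisors T n hn]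
        exact odd_card_divisors_iff (n + 1) (by omega)
      split_ifs with hc
      · constructor
        · intro _; exact ⟨hc.1, hodd.mp hc.2⟩
        · intro _; omega
      · constructor
        · intro h; omega
        · intro ⟨h1, h2⟩; exact absurd ⟨h1, hodd.mpr h2⟩ hc
    have hfil : (List.range T).filter
        (fun n : Nat => decide (PySem.List.pyGetD a2 (n : Int) 0 < 0)) =
        (List.range P).filter (fun n => decide (IsSquare (n + 1))) := by
      have hstep1 : (List.range T).filter
          (fun n : Nat => decide (PySem.List.pyGetD a2 (n : Int) 0 < 0)) =
          (List.range T).filter (fun n => decide (n < P) && decide (IsSquare (n + 1))) := by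
        apply List.filter_congr
        intro n hn
        rw [List.mem_range] at hn
        have hiff := hcond n hn
        rw [decide_eq_decide.mpr hiff]
        · simp
        · infer_instance
      rw [hstep1]
      obtain ⟨d, hd⟩ : ∃ d, T = P + d := ⟨T - P, by omega⟩
      rw [hd]
      exact filter_range_restrict P d _
    rw [hfil]
    have hmapval : ((List.range P).filter (fun n => decide (IsSquare (n + 1)))).map
        (fun n : Nat => -(PySem.List.pyGetD a2 (n : Int) 0)) =
        ((List.range P).filter (fun n => decide (IsSquare (n + 1)))).map
          (fun n : Nat => ((n : Int) + 1)) := by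
      apply List.map_congr_left
      intro n hn
      rw [List.mem_filter, List.mem_range] at hn
      have hnP : n < P := hn.1
      have hsq : IsSquare (n + 1) := by simpa using hn.2
      have hnT : n < T := by omega
      rw [PySem.List.pyGetD_natCast, hval2 n, if_pos hnT]
      unfold model
      have hodd : Odd (cnt T n) := by
        rw [cnt_eq_divisors T n hnT]
        exact (odd_card_divisors_iff (n + 1) (by omega)).mpr hsq
      rw [if_pos ⟨hnP, hodd⟩]
      ring
    rw [hmapval, squares_range_nat, cast_square_map, alt_eq]
    have hmin : min t p = p := min_eq_right hpt
    rw [hmin, ← hP]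
    simp

-- ===== VERDICT (by name: the statement is the Claim_ definition above) =====
theorem turnon_spec : Claim_equal_turnon := by
  intro t p _ hpre
  unfold Spec_turnon
  exact main_eq t p hpre
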